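-- pv_equiv track=rewrite | github.com/eccomaggio/python | latin/create_lookups/process_vocab.py | add_macrons
-- ===== SOURCE A (Python) =====
-- def add_macrons(line):
--     contract_macrons = {
-- "a": "ā",
-- "e": "ē",
-- "i": u"ī",
-- "o": "ō",
-- "u": "ū",
--     }
--     tmp = ""
--     tmp_line = line.split(":")
--     for part in tmp_line:
--         if part[-1:] in ["a", "e", "i", "o", "u"]:
--             part = part[:-1] + contract_macrons[part[-1:]]
--         tmp += part
--     return tmp
-- ===== SOURCE B (Python) =====
-- def add_macrons(line):
--     mac = {"a": "\u0101", "e": "\u0113", "i": "\u012b", "o": "\u014d", "u": "\u016b"}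
--     out = []
--     n = len(line)
--     for i, ch in enumerate(line):
--         if ch == ":":
--             continue
--         if ch in mac and (i + 1 == n or line[i + 1] == ":"):
--             out.append(mac[ch])
--         else:
--             out.append(ch)
--     return "".join(out)
-- ===== Notes on version B (the rewrite author's own statement) =====
-- stated objective: simpler
-- what changed: Replaces A's split-on-colon-into-parts loop with per-part slicing and dict lookup by a single one-pass character scan with one-character lookahead that drops colons and macronizes a lowercase vowel exactly when it is the last character or directly precedes a colon.
import Mathlib
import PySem

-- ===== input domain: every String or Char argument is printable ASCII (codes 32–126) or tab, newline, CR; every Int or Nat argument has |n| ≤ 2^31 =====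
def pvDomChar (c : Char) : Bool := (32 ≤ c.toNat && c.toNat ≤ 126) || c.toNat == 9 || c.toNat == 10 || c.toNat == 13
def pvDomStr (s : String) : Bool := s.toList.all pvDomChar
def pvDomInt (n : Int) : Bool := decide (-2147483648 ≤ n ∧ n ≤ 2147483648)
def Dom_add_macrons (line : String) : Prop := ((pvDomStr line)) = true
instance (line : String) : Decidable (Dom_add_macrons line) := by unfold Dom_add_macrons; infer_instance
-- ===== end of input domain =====

-- B replaces A's split-into-parts-then-per-part-slice loop by a single one-pass scan
-- with one-character lookahead (objective: simpler / idiomatic; return value only).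

-- ===== PORT A =====
-- the contract_macrons dict literal (keys/values as char lists)
def pvMacA : PySem.Dict (List Char) (List Char) := PySem.Dict.mk
  [(['a'], ['ā']), (['e'], ['ē']), (['i'], ['ī']), (['o'], ['ō']), (['u'], ['ū'])]

-- the loop body: 'if part[-1:] in [...]: part = part[:-1] + contract_macrons[part[-1:]]'
-- (the dict key is always present when the branch is taken, so getD's default is never used)
def pvPartA (part : List Char) : List Char :=
  if (PySem.List.slice part (some (-1)) none) ∈ [['a'], ['e'], ['i'], ['o'], ['u']] then
    PySem.List.slice part none (some (-1)) ++
      (PySem.Dict.get? pvMacA (PySem.List.slice part (some (-1)) none)).getD []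
  else part

def add_macrons (line : String) : String :=
  -- tmp = ""; tmp_line = line.split(":"); for part in tmp_line: … ; tmp += part
  String.ofList ((PySem.Chars.splitOn line.toList [':']).foldl (fun tmp part => tmp ++ pvPartA part) [])

-- ===== PORT B =====
def pvVowelB (c : Char) : Option Char :=
  if c = 'a' then some 'ā' else if c = 'e' then some 'ē' else if c = 'i' then some 'ī'
  else if c = 'o' then some 'ō' else if c = 'u' then some 'ū' else none

-- one pass with one-character lookahead: skip ':'; macronize a vowel at end or before ':'
def pvScanB : List Char → List Char
  | [] => []
  | c :: rest =>
    if c = ':' then pvScanB rest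
    else match pvVowelB c with
      | some m => if rest = [] ∨ rest.head? = some ':' then m :: pvScanB rest else c :: pvScanB rest
      | none => c :: pvScanB rest

def add_macrons_alt (line : String) : String :=
  String.ofList (pvScanB line.toList)

-- ===== PRECONDITION & SPEC =====
def Spec_add_macrons (line : String) (out : String) : Prop := out = add_macrons_alt line
instance (line : String) (out : String) : Decidable (Spec_add_macrons line out) := by unfold Spec_add_macrons; infer_instance

-- ===== CLAIM (what is proved, stated in full; the proofs are below) =====
def Claim_equal_add_macrons : Prop := ∀ (line : String), Dom_add_macrons line → Spec_add_macrons line (add_macrons line)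

-- ===== LEMMAS AND PROOFS =====

-- simple structural model of split-on-':' used only in the proofs
def pvSplitCh : List Char → List (List Char)
  | [] => [[]]
  | c :: rest => if c = ':' then [] :: pvSplitCh rest else (pvSplitCh rest).modifyHead (c :: ·)

theorem pvSplitCh_ne_nil (l : List Char) : pvSplitCh l ≠ [] := by
  cases l with
  | nil => simp [pvSplitCh]
  | cons c rest =>
    simp only [pvSplitCh]
    split
    · simp
    · cases h : pvSplitCh rest with
      | nil => exact absurd h (pvSplitCh_ne_nil rest)
      | cons p ps => simp

theorem pvGo_eq (fuel : Nat) : ∀ (l cur : List Char) (accs : List (List Char)),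
    l.length < fuel →
    PySem.Chars.splitOn.go [':'] fuel l cur accs =
      accs.reverse ++ (pvSplitCh l).modifyHead (cur.reverse ++ ·) := by
  induction fuel with
  | zero => intro l cur accs h; omega
  | succ n ih =>
    intro l cur accs h
    cases l with
    | nil =>
      rw [PySem.Chars.splitOn.go.eq_def]
      simp [pvSplitCh]
    | cons c rest =>
      rw [PySem.Chars.splitOn.go.eq_def]
      simp only [List.isPrefixOf, Bool.and_true]
      by_cases hc : c = ':'
      · subst hc
        simp only [beq_self_eq_true, if_pos]
        simp only [List.length_cons, List.length_nil, List.drop_succ_cons, List.drop_zero]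
        rw [ih rest [] (List.reverse cur :: accs) (by simpa using Nat.lt_of_succ_lt_succ h)]
        have hid : List.modifyHead (fun x : List Char => x) (pvSplitCh rest) = pvSplitCh rest := by
          cases pvSplitCh rest <;> simp
        simp [pvSplitCh, hid]
      · rw [if_neg (by simp [beq_iff_eq]; exact fun e => hc e.symm)]
        rw [ih rest (c :: cur) accs (by simpa using Nat.lt_of_succ_lt_succ h)]
        simp only [pvSplitCh, if_neg hc]
        cases hs : pvSplitCh rest with
        | nil => exact absurd hs (pvSplitCh_ne_nil rest)
        | cons p ps => simp

theorem pvSplitOn_eq (l : List Char) :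
    PySem.Chars.splitOn l [':'] = pvSplitCh l := by
  rw [PySem.Chars.splitOn, pvGo_eq (l.length + 1) l [] [] (by omega)]
  cases hs : pvSplitCh l with
  | nil => exact absurd hs (pvSplitCh_ne_nil l)
  | cons p ps => simp

theorem pvPartA_nil : pvPartA [] = [] := by decide

theorem sliceLast (l : List Char) (h : l ≠ []) :
    PySem.List.slice l (some (-1)) none = List.drop (l.length - 1) l := by
  have hl : 1 ≤ l.length := List.length_pos_iff.mpr h
  simp only [PySem.List.slice, PySem.List.clampIdx]
  have h1 : ¬ ((l.length : Int) + (-1) < 0) := by omega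
  have h2 : ((l.length : Int) + (-1)).toNat = l.length - 1 := by omega
  simp only [if_pos (by norm_num : (-1:Int) < 0), if_neg h1, h2]
  exact List.take_of_length_le (by simp [List.length_drop])

theorem sliceInit (l : List Char) : PySem.List.slice l none (some (-1)) = l.dropLast := by
  simp only [PySem.List.slice, PySem.List.clampIdx]
  by_cases h : l = []
  · subst h; simp
  · have hl : 1 ≤ l.length := List.length_pos_iff.mpr h
    have h1 : ¬ ((l.length : Int) + (-1) < 0) := by omega
    have h2 : ((l.length : Int) + (-1)).toNat = l.length - 1 := by omega
    simp only [if_pos (by norm_num : (-1:Int) < 0), if_neg h1, h2, List.drop_zero]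
    exact List.dropLast_eq_take.symm

theorem pvSliceLast_single (c : Char) : PySem.List.slice [c] (some (-1)) none = [c] := by
  simp [PySem.List.slice, PySem.List.clampIdx]

theorem pvPartA_cons_ne (c : Char) (p : List Char) (hp : p ≠ []) :
    pvPartA (c :: p) = c :: pvPartA p := by
  have h1 : PySem.List.slice (c :: p) (some (-1)) none = PySem.List.slice p (some (-1)) none := by
    rw [sliceLast _ (by simp), sliceLast _ hp]
    have hl : 1 ≤ p.length := List.length_pos_iff.mpr hp
    have he : (c :: p).length - 1 = (p.length - 1) + 1 := by simp; omega
    rw [he, List.drop_succ_cons]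
  have h2 : PySem.List.slice (c :: p) none (some (-1)) = c :: PySem.List.slice p none (some (-1)) := by
    rw [sliceInit, sliceInit, List.dropLast_cons_of_ne_nil hp]
  unfold pvPartA
  rw [h1, h2]
  split <;> simp

-- the head part of the split is empty iff the scan is at end-of-string or before a ':'
theorem pvSplitCh_headI_nil_iff (l : List Char) :
    (pvSplitCh l).headI = [] ↔ (l = [] ∨ l.head? = some ':') := by
  cases l with
  | nil => simp [pvSplitCh]
  | cons c rest =>
    simp only [pvSplitCh]
    by_cases hc : c = ':'
    · subst hc; simp
    · rw [if_neg hc]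
      cases hs : pvSplitCh rest with
      | nil => exact absurd hs (pvSplitCh_ne_nil rest)
      | cons p ps => simp [hc]

theorem pvMain (cs : List Char) :
    (pvSplitCh cs).flatMap pvPartA = pvScanB cs := by
  induction cs with
  | nil => simp [pvSplitCh, pvScanB, pvPartA_nil]
  | cons c rest ih =>
    by_cases hc : c = ':'
    · subst hc
      simp [pvSplitCh, pvScanB, pvPartA_nil, ih]
    · simp only [pvSplitCh, if_neg hc, pvScanB]
      cases hs : pvSplitCh rest with
      | nil => exact absurd hs (pvSplitCh_ne_nil rest)
      | cons p ps =>
        rw [hs] at ih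
        by_cases hp : p = []
        · subst hp
          have hend : rest = [] ∨ rest.head? = some ':' := by
            rw [← pvSplitCh_headI_nil_iff]; rw [hs]; rfl
          simp only [List.modifyHead_cons, List.flatMap_cons, if_pos hend]
          rw [← ih]
          cases hv : pvVowelB c with
          | some m =>
            have : pvPartA [c] = [m] := by
              revert hv
              unfold pvVowelB
              split_ifs with h1 h2 h3 h4 h5 <;> intro hv <;>
                first
                  | (injection hv with hv; subst hv; subst_vars; decide)
                  | exact absurd hv (by simp)
            simp [this, pvPartA_nil]
          | none =>
            have hnv : ¬ (c = 'a' ∨ c = 'e' ∨ c = 'i' ∨ c = 'o' ∨ c = 'u') := by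
              revert hv; unfold pvVowelB
              split_ifs <;> intro hv <;> simp_all
            have : pvPartA [c] = [c] := by
              unfold pvPartA
              rw [if_neg]
              rw [pvSliceLast_single]
              simpa using hnv
            simp [this, pvPartA_nil]
        · simp only [List.modifyHead_cons, List.flatMap_cons, pvPartA_cons_ne c p hp]
          have hend : ¬ (rest = [] ∨ rest.head? = some ':') := by
            rw [← pvSplitCh_headI_nil_iff, hs]; simpa using hp
          rw [← ih]
          cases pvVowelB c <;> simp [if_neg hend]

-- ===== VERDICT (by name: the statement is the Claim_ definition above) =====
theorem add_macrons_spec : Claim_equal_add_macrons := by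
  intro line _
  unfold Spec_add_macrons add_macrons add_macrons_alt
  rw [PySem.List.foldl_append_eq_flatMap, pvSplitOn_eq, pvMain]
  rfl
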